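-- pv_equiv track=rewrite | github.com/Fy5tew/OIB-2-1 | lab04.1/ciphers_python/wheatstone_cipher.py | _get_digrams
-- ===== SOURCE A (Python) =====
-- def _get_digrams(message: str, help_char: str, alphabet: str) -> str:
--     digram_letters = 0
--     last_letter = ''
--     digrams = ""
--     for ch in message.upper():
--         if ch not in alphabet.upper():
--             continue
--         if digram_letters >= 2:
--             digrams += ' '
--             digram_letters = 0
--         digrams += ch
--         last_letter = ch
--         digram_letters += 1
--     if digram_letters == 1:
--         digrams += help_char
--     return digrams
-- ===== SOURCE B (Python) =====
-- def _get_digrams(message: str, help_char: str, alphabet: str) -> str: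
--     allowed = alphabet.upper()
--     filtered = ''.join(ch for ch in message.upper() if ch in allowed)
--     digrams = ' '.join(filtered[2 * i:2 * i + 2] for i in range((len(filtered) + 1) // 2))
--     if len(filtered) % 2 == 1:
--         digrams += help_char
--     return digrams
-- ===== Notes on version B (the rewrite author's own statement) =====
-- stated objective: faster
-- what changed: Replaces A's single stateful loop (digram counter, quadratic string +=, conditional space insertion) by two declarative phases: filter the uppercased message once, then slice the filtered string into two-character chunks joined by ' '.join, padding with help_char when the filtered length is odd.
import Mathlib
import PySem

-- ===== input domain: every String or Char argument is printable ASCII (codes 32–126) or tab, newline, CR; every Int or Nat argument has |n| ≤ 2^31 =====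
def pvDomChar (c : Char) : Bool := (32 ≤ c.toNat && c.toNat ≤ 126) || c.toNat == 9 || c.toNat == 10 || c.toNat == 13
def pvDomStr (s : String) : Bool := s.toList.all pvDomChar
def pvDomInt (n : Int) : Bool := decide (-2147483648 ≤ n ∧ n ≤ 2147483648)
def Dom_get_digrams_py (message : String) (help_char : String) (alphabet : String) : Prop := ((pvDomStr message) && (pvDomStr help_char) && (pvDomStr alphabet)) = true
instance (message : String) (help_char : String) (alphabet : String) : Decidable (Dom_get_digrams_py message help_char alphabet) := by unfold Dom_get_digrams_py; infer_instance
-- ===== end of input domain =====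

-- B replaces A's single stateful loop (digram counter, conditional space insertion, leftover flag)
-- by two declarative phases: filter the uppercased message, then slice it into space-joined
-- two-character chunks, appending help_char when the filtered length is odd (measurably faster: join avoids A's quadratic +=).


-- ===== PORT A =====
-- Literal port of A's loop. Python's `ch in alphabet.upper()` is the substring test on the
-- one-character string [ch] (PySem.Chars.isIn). A's `last_letter` variable is assigned but
-- never read, so it is not part of the fold state.
def get_digrams_py (message : String) (help_char : String) (alphabet : String) : String :=
  let st := (PySem.Chars.upper message.toList).foldl
    (fun (st : Nat × List Char) ch =>
      if PySem.Chars.isIn [ch] (PySem.Chars.upper alphabet.toList) = false then st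
      else
        let st1 := if st.1 ≥ 2 then (0, st.2 ++ [' ']) else st
        (st1.1 + 1, st1.2 ++ [ch]))
    (0, ([] : List Char))
  String.ofList (if st.1 = 1 then st.2 ++ help_char.toList else st.2)

-- ===== PORT B =====
-- Port of Source B: filter once, then slice filtered[2*i : 2*i+2] for i in range((len+1)//2),
-- join with ' ', and append help_char verbatim when the filtered length is odd.
def get_digrams_py_alt (message : String) (help_char : String) (alphabet : String) : String :=
  let allowed := PySem.Chars.upper alphabet.toList
  let filtered := (PySem.Chars.upper message.toList).filter
    (fun ch => PySem.Chars.isIn [ch] allowed)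
  let m := PySem.Int.floordiv ((filtered.length : Int) + 1) 2
  let digrams := PySem.Chars.join [' ']
    ((PySem.List.pyRange 0 m 1).map
      (fun i => PySem.List.slice filtered (some (2 * i)) (some (2 * i + 2))))
  String.ofList (if filtered.length % 2 = 1 then digrams ++ help_char.toList else digrams)

-- ===== PRECONDITION & SPEC =====
def Spec_get_digrams_py (message : String) (help_char : String) (alphabet : String) (out : String) : Prop := out = get_digrams_py_alt message help_char alphabet
instance (message : String) (help_char : String) (alphabet : String) (out : String) : Decidable (Spec_get_digrams_py message help_char alphabet out) := by unfold Spec_get_digrams_py; infer_instance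

-- ===== CLAIM (what is proved, stated in full; the proofs are below) =====
def Claim_equal_get_digrams_py : Prop := ∀ (message : String) (help_char : String) (alphabet : String), Dom_get_digrams_py message help_char alphabet → Spec_get_digrams_py message help_char alphabet (get_digrams_py message help_char alphabet)

-- ===== LEMMAS AND PROOFS =====

-- the canonical chunking of the filtered letters into digrams
def chunk2 : List Char → List (List Char)
  | [] => []
  | [a] => [[a]]
  | a :: b :: t => [a, b] :: chunk2 t

theorem chunk2_eq_nil_iff (l : List Char) : chunk2 l = [] ↔ l = [] := by
  match l with
  | [] => simp [chunk2]
  | [a] => simp [chunk2]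
  | a :: b :: t => simp [chunk2]

-- B's slice comprehension, after cast normalisation, is chunk2
theorem range_slices_eq_chunk2 (l : List Char) :
    (List.range ((l.length + 1) / 2)).map (fun k => (l.drop (2 * k)).take 2) = chunk2 l := by
  match l with
  | [] => simp [chunk2]
  | [a] => simp [chunk2]
  | a :: b :: t =>
    have hlen : ((a :: b :: t).length + 1) / 2 = (t.length + 1) / 2 + 1 := by
      simp; omega
    rw [hlen, List.range_succ_eq_map, List.map_cons, List.map_map]
    have hIH := range_slices_eq_chunk2 t
    simp only [chunk2, List.cons.injEq]
    constructor
    · simp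
    · rw [← hIH]
      apply List.map_congr_left
      intro k _
      simp [Nat.succ_eq_add_one, Nat.mul_add]

-- A's loop body restricted to letters of the alphabet
def gstep (st : Nat × List Char) (ch : Char) : Nat × List Char :=
  let st1 := if st.1 ≥ 2 then (0, st.2 ++ [' ']) else st
  (st1.1 + 1, st1.2 ++ [ch])

-- invariant of A's loop, started after a completed digram (counter = 2)
theorem gstep_foldl_two (l : List Char) (ds : List Char) :
    l.foldl gstep (2, ds) =
      ((if l = [] then 2 else if l.length % 2 = 1 then 1 else 2 : Nat),
        ds ++ (if l = [] then [] else ' ' :: PySem.Chars.join [' '] (chunk2 l))) := by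
  match l with
  | [] => simp
  | [a] => simp [gstep, chunk2, PySem.Chars.join_singleton]
  | a :: b :: t =>
    have h1 : gstep (2, ds) a = (1, ds ++ [' ', a]) := by simp [gstep]
    have h2 : gstep (1, ds ++ [' ', a]) b = (2, ds ++ [' ', a, b]) := by simp [gstep]
    have hIH := gstep_foldl_two t (ds ++ [' ', a, b])
    rw [List.foldl_cons, h1, List.foldl_cons, h2, hIH]
    by_cases ht : t = []
    · subst ht
      simp [chunk2, PySem.Chars.join_singleton]
    · have hc : chunk2 t ≠ [] := by
        intro h; exact ht ((chunk2_eq_nil_iff t).mp h)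
      obtain ⟨c, cs, hcc⟩ := List.exists_cons_of_ne_nil hc
      have hjoin : PySem.Chars.join [' '] (chunk2 (a :: b :: t)) =
          [a, b] ++ [' '] ++ PySem.Chars.join [' '] (chunk2 t) := by
        simp only [chunk2, hcc, PySem.Chars.join_cons_cons]
      have hpar : (a :: b :: t).length % 2 = t.length % 2 := by simp; omega
      rw [hjoin, hpar]
      by_cases hp2 : t.length % 2 = 1 <;> simp [ht, hp2]

-- both ports, as a function of the filtered letter list
theorem a_core (f : List Char) (help : List Char) :
    (let st := f.foldl gstep (0, ([] : List Char));
     if st.1 = 1 then st.2 ++ help else st.2) =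
      PySem.Chars.join [' '] (chunk2 f) ++ (if f.length % 2 = 1 then help else []) := by
  match f with
  | [] => simp [chunk2]
  | [a] => simp [gstep, chunk2, PySem.Chars.join_singleton]
  | a :: b :: t =>
    have h1 : gstep (0, ([] : List Char)) a = (1, [a]) := by simp [gstep]
    have h2 : gstep (1, [a]) b = (2, [a, b]) := by simp [gstep]
    simp only [List.foldl_cons, h1, h2, gstep_foldl_two]
    by_cases ht : t = []
    · subst ht
      simp [chunk2, PySem.Chars.join_singleton]
    · have hc : chunk2 t ≠ [] := by
        intro h; exact ht ((chunk2_eq_nil_iff t).mp h)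
      obtain ⟨c, cs, hcc⟩ := List.exists_cons_of_ne_nil hc
      have hjoin : PySem.Chars.join [' '] (chunk2 (a :: b :: t)) =
          [a, b] ++ [' '] ++ PySem.Chars.join [' '] (chunk2 t) := by
        simp only [chunk2, hcc, PySem.Chars.join_cons_cons]
      have hpar : (a :: b :: t).length % 2 = t.length % 2 := by simp; omega
      rw [hjoin, hpar]
      by_cases hp2 : t.length % 2 = 1 <;> simp [ht, hp2]

-- ===== VERDICT (by name: the statement is the Claim_ definition above) =====
theorem get_digrams_py_spec : Claim_equal_get_digrams_py := by
  intro message help_char alphabet _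
  unfold Spec_get_digrams_py
  simp only [get_digrams_py, get_digrams_py_alt]
  set p : Char → Bool :=
    fun ch => PySem.Chars.isIn [ch] (PySem.Chars.upper alphabet.toList) with hp
  set f := (PySem.Chars.upper message.toList).filter p with hf
  -- A's loop over the whole message is A's core loop over the filtered letters
  have hfold : (PySem.Chars.upper message.toList).foldl
      (fun (st : Nat × List Char) ch =>
        if PySem.Chars.isIn [ch] (PySem.Chars.upper alphabet.toList) = false then st
        else
          let st1 := if st.1 ≥ 2 then (0, st.2 ++ [' ']) else st
          (st1.1 + 1, st1.2 ++ [ch]))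
      (0, ([] : List Char)) = f.foldl gstep (0, ([] : List Char)) := by
    rw [hf, List.foldl_filter]
    have hfn : (fun (st : Nat × List Char) ch =>
        if PySem.Chars.isIn [ch] (PySem.Chars.upper alphabet.toList) = false then st
        else
          let st1 := if st.1 ≥ 2 then (0, st.2 ++ [' ']) else st
          (st1.1 + 1, st1.2 ++ [ch])) =
        (fun (st : Nat × List Char) ch => if p ch = true then gstep st ch else st) := by
      funext st ch
      cases hch : p ch <;> simp [hp] at hch <;> simp [gstep, hch]
    rw [hfn]
  -- B's integer arithmetic and slice comprehension, in Nat form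
  have hm : PySem.Int.floordiv ((f.length : Int) + 1) 2 = ((f.length + 1) / 2 : Nat) := by
    rw [show ((f.length : Int) + 1) = ((f.length + 1 : Nat) : Int) by push_cast; ring]
    exact PySem.Int.floordiv_natCast (f.length + 1) 2
  have hchunks : (PySem.List.pyRange 0 (PySem.Int.floordiv ((f.length : Int) + 1) 2) 1).map
      (fun i => PySem.List.slice f (some (2 * i)) (some (2 * i + 2))) = chunk2 f := by
    rw [hm, PySem.List.pyRange_one, List.map_map, ← range_slices_eq_chunk2 f]
    simp only [Int.sub_zero, Int.toNat_natCast]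
    apply List.map_congr_left
    intro k _
    have h2k : (2 : Int) * ((0 : Int) + (k : Int)) = ((2 * k : Nat) : Int) := by
      push_cast; ring
    have h2k2 : ((2 * k : Nat) : Int) + 2 = ((2 * k + 2 : Nat) : Int) := by
      push_cast; ring
    simp only [Function.comp_apply, h2k, h2k2, PySem.List.slice_natCast]
    congr 1
    omega
  rw [hfold, hchunks, a_core f help_char.toList]
  by_cases hpar : f.length % 2 = 1 <;> simp [hpar]
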